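-- pv_equiv track=rewrite | github.com/jschmidtnj/interviews | google/interview1/question1.py | remove_br
-- ===== SOURCE A (Python) =====
-- def remove_br(the_str):
--   # base case is if there is no br in the string
--   # first swap => the_str = rbrbbr
--   num_swaps = 0
--   for i in range(len(the_str) - 1):
--     if the_str[i:i+2] == "br":
--       the_str = the_str[:i] + "rb" + the_str[i + 2:]
--       num_swaps += 1
--   if num_swaps == 0:
--     return 0
--   return num_swaps + remove_br(the_str)
-- ===== SOURCE B (Python) =====
-- def remove_br(the_str):
--   # one pass: count, for each r-character, the number of 'b's before it in the
--   # current maximal run of b/r characters (= total adjacent br->rb swaps)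
--   total = 0
--   bs = 0
--   for c in the_str:
--     if c == 'b':
--       bs += 1
--     elif c == 'r':
--       total += bs
--     else:
--       bs = 0
--   return total
-- ===== Notes on version B (the rewrite author's own statement) =====
-- stated objective: faster
-- what changed: replaces the repeated full-string swap passes with recursion by a single linear scan that adds, for each r-character, the count of b-characters seen so far in the current run of b/r characters
import Mathlib
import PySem

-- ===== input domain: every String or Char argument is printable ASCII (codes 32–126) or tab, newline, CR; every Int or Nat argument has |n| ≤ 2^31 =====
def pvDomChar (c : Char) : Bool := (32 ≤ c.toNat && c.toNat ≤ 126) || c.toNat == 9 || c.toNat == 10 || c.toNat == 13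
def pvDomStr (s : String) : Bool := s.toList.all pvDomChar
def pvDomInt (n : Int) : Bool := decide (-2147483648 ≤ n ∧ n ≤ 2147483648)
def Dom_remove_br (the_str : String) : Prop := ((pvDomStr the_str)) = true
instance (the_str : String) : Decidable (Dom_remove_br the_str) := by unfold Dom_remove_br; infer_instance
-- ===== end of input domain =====

-- B replaces A's repeated swap passes with recursion by one linear scan counting,
-- for each r-character, the b-characters before it in the current run of b/r characters.

-- ===== PORT A =====
-- A-side helpers, needed for the port's TERMINATION proof (the port cites
-- loop_decreases in its decreasing_by): fInv is the inversion potential that each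
-- swap decreases by one, passBR a structural description of one pass of A's loop.

-- inversion potential: pending-'b' credit bs is paid at each 'r', reset elsewhere
def fInv : Int → List Char → Int
  | _, [] => 0
  | bs, c :: t => if c = 'b' then fInv (bs + 1) t else if c = 'r' then bs + fInv bs t else fInv 0 t

theorem fInv_b (bs : Int) (t : List Char) : fInv bs ('b' :: t) = fInv (bs + 1) t := by
  simp [fInv]

theorem fInv_r (bs : Int) (t : List Char) : fInv bs ('r' :: t) = bs + fInv bs t := by
  simp [fInv]

theorem fInv_other (bs : Int) (c : Char) (t : List Char) (h1 : c ≠ 'b') (h2 : c ≠ 'r') :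
    fInv bs (c :: t) = fInv 0 t := by
  simp [fInv, h1, h2]

-- one pass of A's for-loop, described structurally (proved equal to the loop in loop_eq_pass)
def passBR : List Char → List Char × Nat
  | [] => ([], 0)
  | [c] => ([c], 0)
  | a :: b :: rest =>
    if a = 'b' ∧ b = 'r' then
      let q := passBR ('b' :: rest); ('r' :: q.1, q.2 + 1)
    else
      let q := passBR (b :: rest); (a :: q.1, q.2)
  termination_by xs => xs.length
  decreasing_by all_goals simp

theorem passBR_br (rest : List Char) :
    passBR ('b' :: 'r' :: rest) =
      ('r' :: (passBR ('b' :: rest)).1, (passBR ('b' :: rest)).2 + 1) := by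
  simp [passBR]

theorem passBR_cons (a b : Char) (rest : List Char) (h : ¬(a = 'b' ∧ b = 'r')) :
    passBR (a :: b :: rest) = (a :: (passBR (b :: rest)).1, (passBR (b :: rest)).2) := by
  rw [passBR, if_neg h]

-- the body of A's for-loop, one index step
def removeBrStep (st : List Char × Int) (i : Int) : List Char × Int :=
  if PySem.List.slice st.1 (some i) (some (i + 2)) = ['b', 'r'] then
    (PySem.List.slice st.1 none (some i) ++ ['r', 'b'] ++ PySem.List.slice st.1 (some (i + 2)) none,
     st.2 + 1)
  else st

theorem fInv_nonneg : ∀ (s : List Char) (bs : Int), 0 ≤ bs → 0 ≤ fInv bs s := by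
  intro s
  induction s with
  | nil => intro bs _; simp [fInv]
  | cons c t ih =>
    intro bs hbs
    by_cases h1 : c = 'b'
    · subst h1; rw [fInv_b]; exact ih (bs + 1) (by omega)
    · by_cases h2 : c = 'r'
      · subst h2; rw [fInv_r]; have := ih bs hbs; omega
      · rw [fInv_other bs c t h1 h2]; exact ih 0 le_rfl

-- each swap of a pass decreases the potential by exactly one
theorem pass_fInv : ∀ (s : List Char) (bs : Int),
    fInv bs (passBR s).1 + ((passBR s).2 : Int) = fInv bs s := by
  intro s
  induction s using passBR.induct with
  | case1 => intro bs; simp [passBR, fInv]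
  | case2 c => intro bs; simp [passBR]
  | case3 a b rest h ih =>
    intro bs
    obtain ⟨ha, hb⟩ := h; subst ha; subst hb
    rw [passBR_br, fInv_b, fInv_r]
    have h1 := ih bs
    rw [fInv_b] at h1
    rw [fInv_r]
    push_cast
    omega
  | case4 a b rest h ih =>
    intro bs
    rw [passBR_cons a b rest h]
    by_cases ha : a = 'b'
    · subst ha
      rw [fInv_b, fInv_b]
      exact ih (bs + 1)
    · by_cases ha' : a = 'r'
      · subst ha'
        rw [fInv_r, fInv_r]
        have := ih bs
        omega
      · rw [fInv_other bs a _ ha ha', fInv_other bs a _ ha ha']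
        exact ih 0

-- A's index loop, run from position p.length on the already-processed prefix p
-- and remaining suffix u, equals the structural pass on u
theorem loop_eq_pass : ∀ (u p : List Char) (k : Int),
    (PySem.List.pyRange (p.length : Int) ((p.length : Int) + (u.length : Int) - 1) 1).foldl
        removeBrStep (p ++ u, k)
      = (p ++ (passBR u).1, k + ((passBR u).2 : Int)) := by
  intro u
  induction u using passBR.induct with
  | case1 =>
    intro p k
    rw [PySem.List.pyRange_one_eq_nil (by simp)]
    simp [passBR]
  | case2 c =>
    intro p k
    rw [PySem.List.pyRange_one_eq_nil (by simp)]
    simp [passBR]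
  | case3 a b rest h ih =>
    obtain ⟨ha, hb⟩ := h; subst ha; subst hb
    intro p k
    rw [PySem.List.pyRange_one_cons (by simp; omega)]
    simp only [List.foldl_cons]
    have hstep : removeBrStep (p ++ 'b' :: 'r' :: rest, k) (p.length : Int)
        = ((p ++ ['r']) ++ ('b' :: rest), k + 1) := by
      unfold removeBrStep
      rw [if_pos]
      · rw [PySem.List.slice_to_natCast]
        rw [show ((p.length : Int) + 2) = (((p.length + 2 : Nat)) : Int) by push_cast; ring]
        rw [PySem.List.slice_from_natCast]
        rw [List.drop_append]
        simp
      · rw [show ((p.length : Int) + 2) = ((p.length : Int) + ((2 : Nat) : Int)) by norm_num]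
        rw [PySem.List.slice_natCast_add]
        simp
    rw [hstep]
    have hbound : (p.length : Int) + 1 = (((p ++ ['r']).length : Nat) : Int) := by
      simp
    have hbound2 : (p.length : Int) + (('b' :: 'r' :: rest).length : Int) - 1
        = (((p ++ ['r']).length : Nat) : Int) + ((('b' :: rest).length : Nat) : Int) - 1 := by
      simp; ring
    rw [hbound, hbound2, ih (p ++ ['r']) (k + 1)]
    rw [passBR_br]
    refine Prod.ext ?_ ?_
    · simp
    · push_cast; ring
  | case4 a b rest h ih =>
    intro p k
    rw [PySem.List.pyRange_one_cons (by simp; omega)]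
    simp only [List.foldl_cons]
    have hstep : removeBrStep (p ++ a :: b :: rest, k) (p.length : Int)
        = ((p ++ [a]) ++ (b :: rest), k) := by
      have hcond : ¬ (PySem.List.slice (p ++ a :: b :: rest) (some (p.length : Int))
          (some ((p.length : Int) + 2)) = ['b', 'r']) := by
        rw [show ((p.length : Int) + 2) = ((p.length : Int) + ((2 : Nat) : Int)) by norm_num]
        rw [PySem.List.slice_natCast_add]
        simp only [List.drop_left]
        intro hcontra
        simp at hcontra
        exact h ⟨hcontra.1, hcontra.2⟩
      unfold removeBrStep
      rw [if_neg hcond]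
      refine Prod.ext ?_ ?_
      · simp
      · simp
    rw [hstep]
    have hbound : (p.length : Int) + 1 = (((p ++ [a]).length : Nat) : Int) := by
      simp
    have hbound2 : (p.length : Int) + ((a :: b :: rest).length : Int) - 1
        = (((p ++ [a]).length : Nat) : Int) + (((b :: rest).length : Nat) : Int) - 1 := by
      simp; ring
    rw [hbound, hbound2, ih (p ++ [a]) k]
    rw [passBR_cons a b rest h]
    refine Prod.ext ?_ ?_
    · simp
    · simp

-- the potential strictly decreases whenever a pass made a swap (termination of the port)
theorem loop_decreases (cs : List Char)
    (h : ¬ ((PySem.List.pyRange 0 ((cs.length : Int) - 1) 1).foldl removeBrStep (cs, 0)).2 = 0) :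
    (fInv 0 ((PySem.List.pyRange 0 ((cs.length : Int) - 1) 1).foldl removeBrStep (cs, 0)).1).toNat
      < (fInv 0 cs).toNat := by
  have hl := loop_eq_pass cs [] 0
  simp only [List.length_nil, Nat.cast_zero, zero_add, List.nil_append] at hl
  rw [hl] at h ⊢
  dsimp only at h ⊢
  have hk : (passBR cs).2 ≠ 0 := by
    intro h0; apply h; rw [h0]; simp
  have hfi := pass_fInv cs 0
  have h1 := fInv_nonneg (passBR cs).1 0 le_rfl
  have h2 := fInv_nonneg cs 0 le_rfl
  omega

-- the recursive worker of A on the char list (the string is ported via toList,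
-- per the PySem convention of treating str as List Char)
def removeBrRec (cs : List Char) : Int :=
  let st := (PySem.List.pyRange 0 ((cs.length : Int) - 1) 1).foldl removeBrStep (cs, 0)
  if st.2 = 0 then 0 else st.2 + removeBrRec st.1
  termination_by (fInv 0 cs).toNat
  decreasing_by exact loop_decreases cs (by assumption)

def remove_br (the_str : String) : Int := removeBrRec the_str.toList

-- ===== PORT B =====
def remove_br_alt (the_str : String) : Int :=
  let st := the_str.toList.foldl
    (fun (st : Int × Int) c =>
      if c = 'b' then (st.1, st.2 + 1)
      else if c = 'r' then (st.1 + st.2, st.2)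
      else (st.1, 0)) (0, 0)
  st.1

-- ===== PRECONDITION & SPEC =====
def Spec_remove_br (the_str : String) (out : Int) : Prop := out = remove_br_alt the_str
instance (the_str : String) (out : Int) : Decidable (Spec_remove_br the_str out) := by unfold Spec_remove_br; infer_instance

-- ===== CLAIM (what is proved, stated in full; the proofs are below) =====
def Claim_equal_remove_br : Prop := ∀ (the_str : String), Dom_remove_br the_str → Spec_remove_br the_str (remove_br the_str)

-- ===== LEMMAS AND PROOFS =====

-- number of 'r's in the leading b/r-run of s
def gSeg : List Char → Int
  | [] => 0
  | c :: t => if c = 'b' then gSeg t else if c = 'r' then gSeg t + 1 else 0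

theorem gSeg_b (t : List Char) : gSeg ('b' :: t) = gSeg t := by simp [gSeg]

theorem gSeg_r (t : List Char) : gSeg ('r' :: t) = gSeg t + 1 := by simp [gSeg]

theorem gSeg_other (c : Char) (t : List Char) (h1 : c ≠ 'b') (h2 : c ≠ 'r') :
    gSeg (c :: t) = 0 := by simp [gSeg, h1, h2]

theorem fInv_eq_gSeg : ∀ (s : List Char) (bs : Int), fInv bs s = fInv 0 s + bs * gSeg s := by
  intro s
  induction s with
  | nil => intro bs; simp [fInv, gSeg]
  | cons c t ih =>
    intro bs
    by_cases h1 : c = 'b'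
    · subst h1
      rw [fInv_b, fInv_b, ih (bs + 1), ih (0 + 1), gSeg_b]
      ring
    · by_cases h2 : c = 'r'
      · subst h2
        rw [fInv_r, fInv_r, ih bs, gSeg_r]
        ring
      · rw [fInv_other bs c t h1 h2, fInv_other 0 c t h1 h2, gSeg_other c t h1 h2]
        ring

-- a pass with zero swaps means the potential is already zero
theorem pass_snd_zero_fInv : ∀ (s : List Char), (passBR s).2 = 0 →
    fInv 0 s = 0 ∧ (s.head? = some 'b' → gSeg s = 0) := by
  intro s
  induction s using passBR.induct with
  | case1 => simp [passBR, fInv, gSeg]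
  | case2 c =>
    intro _
    constructor
    · by_cases h1 : c = 'b'
      · subst h1; rw [fInv_b]; simp [fInv]
      · by_cases h2 : c = 'r'
        · subst h2; rw [fInv_r]; simp [fInv]
        · rw [fInv_other 0 c [] h1 h2]; simp [fInv]
    · intro hc
      simp at hc
      subst hc
      simp [gSeg]
  | case3 a b rest h ih =>
    obtain ⟨ha, hb⟩ := h; subst ha; subst hb
    rw [passBR_br]
    simp
  | case4 a b rest h ih =>
    rw [passBR_cons a b rest h]
    intro hz
    obtain ⟨h0, hhead⟩ := ih hz
    have hg : b ≠ 'r' → gSeg (b :: rest) = 0 := by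
      intro hbr
      by_cases hbb : b = 'b'
      · exact hhead (by simp [hbb])
      · exact gSeg_other b rest hbb hbr
    constructor
    · by_cases ha : a = 'b'
      · subst ha
        have hbnr : b ≠ 'r' := fun hbr => h ⟨rfl, hbr⟩
        rw [fInv_b, fInv_eq_gSeg (b :: rest) (0 + 1), h0, hg hbnr]
        ring
      · by_cases ha' : a = 'r'
        · subst ha'
          rw [fInv_r, h0]
          ring
        · rw [fInv_other 0 a _ ha ha']
          exact h0
    · intro hha
      simp at hha
      subst hha
      have hbnr : b ≠ 'r' := fun hbr => h ⟨rfl, hbr⟩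
      rw [gSeg_b]
      exact hg hbnr

-- A's worker computes the inversion potential
theorem removeBrRec_eq_aux : ∀ (n : Nat) (cs : List Char),
    (fInv 0 cs).toNat ≤ n → removeBrRec cs = fInv 0 cs := by
  intro n
  induction n with
  | zero =>
    intro cs hle
    rw [removeBrRec]
    have hl := loop_eq_pass cs [] 0
    simp only [List.length_nil, Nat.cast_zero, zero_add, List.nil_append] at hl
    simp only [hl]
    by_cases hk : (passBR cs).2 = 0
    · rw [if_pos (by exact_mod_cast hk)]
      exact ((pass_snd_zero_fInv cs hk).1).symm
    · exfalso
      have hdec := loop_decreases cs (by rw [hl]; dsimp only; exact_mod_cast hk)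
      rw [hl] at hdec
      dsimp only at hdec
      omega
  | succ n ih =>
    intro cs hle
    rw [removeBrRec]
    have hl := loop_eq_pass cs [] 0
    simp only [List.length_nil, Nat.cast_zero, zero_add, List.nil_append] at hl
    simp only [hl]
    by_cases hk : (passBR cs).2 = 0
    · rw [if_pos (by exact_mod_cast hk)]
      exact ((pass_snd_zero_fInv cs hk).1).symm
    · rw [if_neg (by exact_mod_cast hk)]
      have hdec := loop_decreases cs (by rw [hl]; dsimp only; exact_mod_cast hk)
      rw [hl] at hdec
      dsimp only at hdec
      rw [ih (passBR cs).1 (by omega)]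
      have := pass_fInv cs 0
      omega

theorem removeBrRec_eq (cs : List Char) : removeBrRec cs = fInv 0 cs :=
  removeBrRec_eq_aux (fInv 0 cs).toNat cs le_rfl

-- B's fold computes tot + fInv bs over the rest of the list
theorem alt_foldl : ∀ (l : List Char) (tot bs : Int),
    (l.foldl (fun (st : Int × Int) c =>
      if c = 'b' then (st.1, st.2 + 1)
      else if c = 'r' then (st.1 + st.2, st.2)
      else (st.1, 0)) (tot, bs)).1 = tot + fInv bs l := by
  intro l
  induction l with
  | nil => intro tot bs; simp [fInv]
  | cons c t ih =>
    intro tot bs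
    simp only [List.foldl_cons]
    by_cases h1 : c = 'b'
    · subst h1
      rw [if_pos rfl, fInv_b]
      exact ih tot (bs + 1)
    · by_cases h2 : c = 'r'
      · subst h2
        rw [if_neg (by decide), if_pos rfl, fInv_r, ih (tot + bs) bs]
        ring
      · rw [if_neg h1, if_neg h2, fInv_other bs c t h1 h2, ih tot 0]

-- ===== VERDICT (by name: the statement is the Claim_ definition above) =====
theorem remove_br_spec : Claim_equal_remove_br := by
  intro s _
  unfold Spec_remove_br remove_br remove_br_alt
  rw [removeBrRec_eq]
  show fInv 0 s.toList = (s.toList.foldl (fun (st : Int × Int) c =>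
      if c = 'b' then (st.1, st.2 + 1)
      else if c = 'r' then (st.1 + st.2, st.2)
      else (st.1, 0)) (0, 0)).1
  rw [alt_foldl s.toList 0 0]
  ring
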